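-- pv_equiv track=rewrite | github.com/bonacaDo/plddt-weighted-inverse-protein-folding | plddt_weighted/scripts/merge_datasets.py | renumber_clusters
-- ===== SOURCE A (Python) =====
-- def renumber_clusters(rows, start_id):
--     """Remap cluster IDs in *rows* so they begin at *start_id*.
--
--     The relative grouping is preserved: entries that previously shared a
--     cluster ID will still share one after renumbering.
--
--     Returns (updated_rows, next_available_id).
--     """
--     old_to_new = {}
--     next_id = start_id
--     for row in rows:
--         old = row['cluster']
--         if old not in old_to_new:
--             old_to_new[old] = next_id
--             next_id += 1
--         row['cluster'] = str(old_to_new[old])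
--     return rows, next_id
-- ===== SOURCE B (Python) =====
-- def renumber_clusters(rows, start_id):
--     """Remap cluster IDs in *rows* so they begin at *start_id*.
--
--     Index-then-scatter: first build an index mapping each old cluster ID
--     to the list of row positions holding it (first-appearance order),
--     then walk the groups, stamping one fresh ID per group into its rows.
--     """
--     groups = {}
--     for i, row in enumerate(rows):
--         groups.setdefault(row['cluster'], []).append(i)
--     for new_id, members in enumerate(groups.values(), start=start_id):
--         for i in members:
--             rows[i]['cluster'] = str(new_id)
--     return rows, start_id + len(groups)
-- ===== Notes on version B (the rewrite author's own statement) =====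
-- stated objective: alternative
-- what changed: Replaces A's single row-by-row loop that grows an old-to-new dict while rewriting each row by an index-then-scatter scheme: one pass builds a map from each old cluster ID to the list of row positions holding it, then a second pass walks the groups and stamps one fresh ID per group into its member rows by position.
import Mathlib
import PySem

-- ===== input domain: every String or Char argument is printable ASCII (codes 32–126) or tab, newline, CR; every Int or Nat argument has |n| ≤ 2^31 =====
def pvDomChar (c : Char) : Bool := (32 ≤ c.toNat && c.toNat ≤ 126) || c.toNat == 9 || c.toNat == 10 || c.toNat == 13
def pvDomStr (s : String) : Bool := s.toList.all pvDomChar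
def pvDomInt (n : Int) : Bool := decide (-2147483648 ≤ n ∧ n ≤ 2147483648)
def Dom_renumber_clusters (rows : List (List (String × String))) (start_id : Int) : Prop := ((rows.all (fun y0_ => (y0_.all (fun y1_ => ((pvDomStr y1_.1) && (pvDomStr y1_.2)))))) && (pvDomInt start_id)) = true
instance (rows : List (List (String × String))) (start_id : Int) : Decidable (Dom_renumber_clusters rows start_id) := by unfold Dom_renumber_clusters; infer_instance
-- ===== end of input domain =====

-- B replaces A's interleaved dict-building row loop by index-then-scatter (group row positions by old ID, then stamp one fresh ID per group): a different traversal, same values.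
-- Both Pythons mutate the rows' dicts in place; the equivalence proved here is about the return value.


-- ===== PORT A =====
-- row['cluster'] : first-match lookup in the row dict; KeyError (missing key) is excluded by Pre_,
-- so the port reads it with default "" — that branch is never taken inside Pre_.
def pvCluster (row : List (String × String)) : String :=
  (PySem.Dict.mk row).getD "cluster" ""

-- row['cluster'] = v : overwrite in place, keeping the key's position
def pvSetCluster (row : List (String × String)) (v : String) : List (String × String) :=
  ((PySem.Dict.mk row).insert "cluster" v).items

def renumber_clusters (rows : List (List (String × String))) (start_id : Int) : (List (List (String × String))) × Int :=
  let fin := rows.foldl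
    (fun (st : PySem.Dict String Int × Int × List (List (String × String))) row =>
      let old := pvCluster row
      let m' := if st.1.contains old then st.1 else st.1.insert old st.2.1
      let next' := if st.1.contains old then st.2.1 else st.2.1 + 1
      let row' := pvSetCluster row (PySem.Int.toStr (m'.getD old 0))
      (m', next', st.2.2 ++ [row']))
    (PySem.Dict.empty, start_id, [])
  (fin.2.2, fin.2.1)

-- ===== PORT B =====
def renumber_clusters_alt (rows : List (List (String × String))) (start_id : Int) : (List (List (String × String))) × Int :=
  -- groups.setdefault(row['cluster'], []).append(i)  ≡  modify with default []
  let groups := (PySem.List.enumerate rows).foldl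
    (fun (g : PySem.Dict String (List Int)) p => g.modify (pvCluster p.2) [] (fun l => l ++ [p.1]))
    PySem.Dict.empty
  let res := (PySem.List.enumerate groups.values start_id).foldl
    (fun (r : List (List (String × String))) q =>
      q.2.foldl (fun r i => r.set i.toNat (pvSetCluster (r.getD i.toNat []) (PySem.Int.toStr q.1))) r)
    rows
  (res, start_id + (groups.size : Int))

-- ===== PRECONDITION & SPEC =====
-- Pre_ excludes exactly the inputs on which A raises KeyError: a row without a 'cluster' key.
def Pre_renumber_clusters (rows : List (List (String × String))) (start_id : Int) : Prop :=
  rows.all (fun row => (PySem.Dict.mk row).contains "cluster") = true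
instance (rows : List (List (String × String))) (start_id : Int) : Decidable (Pre_renumber_clusters rows start_id) := by unfold Pre_renumber_clusters; infer_instance

def pvWitness_renumber_clusters : (List (List (String × String))) × Int :=
  ([[("cluster", "a"), ("x", "1")], [("cluster", "b")], [("cluster", "a")]], 5)

def Spec_renumber_clusters (rows : List (List (String × String))) (start_id : Int) (out : (List (List (String × String))) × Int) : Prop := out = renumber_clusters_alt rows start_id
instance (rows : List (List (String × String))) (start_id : Int) (out : (List (List (String × String))) × Int) : Decidable (Spec_renumber_clusters rows start_id out) := by unfold Spec_renumber_clusters; infer_instance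

-- ===== CLAIM (what is proved, stated in full; the proofs are below) =====
def Claim_equal_renumber_clusters : Prop := ∀ (rows : List (List (String × String))) (start_id : Int), Dom_renumber_clusters rows start_id → Pre_renumber_clusters rows start_id → Spec_renumber_clusters rows start_id (renumber_clusters rows start_id)

-- ===== LEMMAS AND PROOFS =====

-- ---------- shared canonical form ----------

-- the distinct old cluster IDs, in first-appearance order
def pvDs (rows : List (List (String × String))) : List String :=
  PySem.Set.ofList (rows.map pvCluster)

-- the row positions (as Python ints) holding old cluster ID c, in order
def pvIdxList (rows : List (List (String × String))) (c : String) : List Int :=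
  ((PySem.List.enumerate rows).filter (fun p => pvCluster p.2 == c)).map (·.1)

-- ---------- A side (dict-items invariant) ----------

-- items of A's dict after seeing the distinct olds `ds`, first assigned value `start`
def pvItemsOf (start : Int) : List String → List (String × Int)
  | [] => []
  | d :: ds => (d, start) :: pvItemsOf (start + 1) ds

theorem pvItemsOf_append (start : Int) (ds : List String) (x : String) :
    pvItemsOf start (ds ++ [x]) = pvItemsOf start ds ++ [(x, start + ds.length)] := by
  induction ds generalizing start with
  | nil => simp [pvItemsOf]
  | cons d ds ih =>
    simp [pvItemsOf, ih, List.length_cons]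
    ring_nf

theorem keys_pvItemsOf (start : Int) (ds : List String) :
    (PySem.Dict.mk (pvItemsOf start ds)).keys = ds := by
  induction ds generalizing start with
  | nil => simp [pvItemsOf, PySem.Dict.keys]
  | cons d ds ih => simp [pvItemsOf, PySem.Dict.keys] at ih ⊢; exact ih _

theorem get?_pvItemsOf (start : Int) (ds : List String) (x : String) (hx : x ∈ ds) :
    (PySem.Dict.mk (pvItemsOf start ds)).get? x
      = some (start + ((PySem.List.index? ds x).getD 0 : Nat)) := by
  induction ds generalizing start with
  | nil => simp at hx
  | cons d ds ih =>
    by_cases hdx : d = x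
    · subst hdx
      rw [PySem.List.index?_cons_self]
      simp [pvItemsOf, PySem.Dict.get?_mk_cons]
    · rcases List.mem_cons.mp hx with h | h
      · exact absurd h.symm hdx
      · rw [PySem.List.index?_cons_of_ne ds hdx]
        have := ih (start + 1) h
        cases hidx : PySem.List.index? ds x with
        | none => exact absurd ((PySem.List.index?_eq_none_iff ds x).mp hidx) (by simp [h])
        | some k =>
          rw [hidx] at this
          simp [pvItemsOf, PySem.Dict.get?_mk_cons, hdx, this]
          ring

theorem contains_pvItemsOf (start : Int) (ds : List String) (x : String) :
    (PySem.Dict.mk (pvItemsOf start ds)).contains x = decide (x ∈ ds) := by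
  rw [PySem.Dict.contains_eq_decide_mem_keys, keys_pvItemsOf]

-- the main loop invariant for A's fold
theorem loopA_inv (start_id : Int) (rows : List (List (String × String))) :
    ∀ (ds : List String) (acc : List (List (String × String))), ds.Nodup →
    rows.foldl
      (fun (st : PySem.Dict String Int × Int × List (List (String × String))) row =>
        let old := pvCluster row
        let m' := if st.1.contains old then st.1 else st.1.insert old st.2.1
        let next' := if st.1.contains old then st.2.1 else st.2.1 + 1
        let row' := pvSetCluster row (PySem.Int.toStr (m'.getD old 0))
        (m', next', st.2.2 ++ [row']))
      (PySem.Dict.mk (pvItemsOf start_id ds), start_id + ds.length, acc)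
    = (PySem.Dict.mk (pvItemsOf start_id (PySem.Set.update ds (rows.map pvCluster))),
       start_id + (PySem.Set.update ds (rows.map pvCluster)).length,
       acc ++ rows.map (fun row =>
         pvSetCluster row (PySem.Int.toStr (start_id +
           ((PySem.List.index? (PySem.Set.update ds (rows.map pvCluster)) (pvCluster row)).getD 0 : Nat))))) := by
  induction rows with
  | nil => intro ds acc _; simp [PySem.Set.update]
  | cons row rest ih =>
    intro ds acc hnd
    have hupd : PySem.Set.update ds (((row :: rest).map pvCluster)) =
        PySem.Set.update (PySem.Set.add ds (pvCluster row)) (rest.map pvCluster) := by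
      simp [PySem.Set.update_cons]
    rw [List.foldl_cons]
    by_cases hin : pvCluster row ∈ ds
    · -- old already seen: dict and counter unchanged
      have hadd : PySem.Set.add ds (pvCluster row) = ds := by
        simp [PySem.Set.add, PySem.Set.contains, hin]
      have hc : (PySem.Dict.mk (pvItemsOf start_id ds)).contains (pvCluster row) = true := by
        rw [contains_pvItemsOf]; simp [hin]
      have hmem' : pvCluster row ∈ PySem.Set.update ds (rest.map pvCluster) := by
        have := PySem.Set.update_eq_append_filter (s := ds) (xs := rest.map pvCluster)
        rw [this]; exact List.mem_append_left _ hin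
      have hidx : PySem.List.index? (PySem.Set.update ds (rest.map pvCluster)) (pvCluster row)
          = PySem.List.index? ds (pvCluster row) := by
        rw [PySem.Set.update_eq_append_filter]
        exact PySem.List.index?_append_of_mem _ hin
      have hval : (PySem.Dict.mk (pvItemsOf start_id ds)).getD (pvCluster row) 0
          = start_id + ((PySem.List.index? ds (pvCluster row)).getD 0 : Nat) := by
        rw [PySem.Dict.getD_eq_get?_getD, get?_pvItemsOf _ _ _ hin]; rfl
      simp only [hc, if_true]
      rw [ih ds _ hnd]
      rw [hupd, hadd]
      simp only [PySem.List.index?_eq_idxOf?] at hidx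
      simp [hval, hidx]
    · -- new old: appended to the dict with value start_id + |ds|
      have hc : (PySem.Dict.mk (pvItemsOf start_id ds)).contains (pvCluster row) = false := by
        rw [contains_pvItemsOf]; simp [hin]
      have hins : (PySem.Dict.mk (pvItemsOf start_id ds)).insert (pvCluster row) (start_id + ds.length)
          = PySem.Dict.mk (pvItemsOf start_id (ds ++ [pvCluster row])) := by
        apply PySem.Dict.ext
        rw [PySem.Dict.items_insert_of_not_contains _ _ hc, pvItemsOf_append]
      have hadd : PySem.Set.add ds (pvCluster row) = ds ++ [pvCluster row] := by
        simp [PySem.Set.add, PySem.Set.contains, hin]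
      have hnd' : (ds ++ [pvCluster row]).Nodup := by
        simp [List.nodup_append, hnd]
        intro a ha hae
        exact hin (hae ▸ ha)
      have hmem1 : pvCluster row ∈ ds ++ [pvCluster row] := by simp
      have hval : (PySem.Dict.mk (pvItemsOf start_id (ds ++ [pvCluster row]))).getD (pvCluster row) 0
          = start_id + (((PySem.List.index? (ds ++ [pvCluster row]) (pvCluster row)).getD 0 : Nat)) := by
        rw [PySem.Dict.getD_eq_get?_getD, get?_pvItemsOf _ _ _ hmem1]; rfl
      have hidx0 : PySem.List.index? (ds ++ [pvCluster row]) (pvCluster row) = some ds.length :=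
        PySem.List.index?_append_singleton_self ds _ hin
      have hidx : PySem.List.index?
            (PySem.Set.update (ds ++ [pvCluster row]) (rest.map pvCluster)) (pvCluster row)
          = some ds.length := by
        rw [PySem.Set.update_eq_append_filter, PySem.List.index?_append_of_mem _ hmem1, hidx0]
      simp only [hc, Bool.false_eq_true, if_false]
      rw [hins]
      have hlen : start_id + (ds.length : Int) + 1 = start_id + ((ds ++ [pvCluster row]).length : Int) := by
        simp [List.length_append]; ring
      rw [hlen, ih (ds ++ [pvCluster row]) _ hnd']
      rw [hupd, hadd]
      simp only [PySem.List.index?_eq_idxOf?] at hval hidx0 hidx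
      simp [hval, hidx0, hidx]

-- A's result, in canonical (map) form
theorem renumber_clusters_eq_canonical (rows : List (List (String × String))) (start_id : Int) :
    renumber_clusters rows start_id
      = (rows.map (fun row =>
           pvSetCluster row (PySem.Int.toStr (start_id +
             ((PySem.List.index? (pvDs rows) (pvCluster row)).getD 0 : Nat)))),
         start_id + (pvDs rows).length) := by
  unfold renumber_clusters
  have key := loopA_inv start_id rows [] [] List.nodup_nil
  simp only [PySem.Set.update_nil_left, List.length_nil, Nat.cast_zero, add_zero] at key
  dsimp only
  rw [show (PySem.Dict.empty : PySem.Dict String Int) = PySem.Dict.mk (pvItemsOf start_id []) from rfl, key]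
  simp [pvDs]

-- ---------- B side (index-then-scatter) ----------

-- the inner write loop and the group scatter of port B, named for the proofs
def pvWrite (v : Int) (m : List Int) (r : List (List (String × String))) : List (List (String × String)) :=
  m.foldl (fun r i => r.set i.toNat (pvSetCluster (r.getD i.toNat []) (PySem.Int.toStr v))) r

def pvScatter (gs : List (List Int)) (n : Int) (r : List (List (String × String))) : List (List (String × String)) :=
  (PySem.List.enumerate gs n).foldl (fun r q => pvWrite q.1 q.2 r) r

theorem length_pvWrite (v : Int) (m : List Int) (r : List (List (String × String))) :
    (pvWrite v m r).length = r.length := by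
  induction m generalizing r with
  | nil => rfl
  | cons j m ih =>
    rw [show pvWrite v (j :: m) r
        = pvWrite v m (r.set j.toNat (pvSetCluster (r.getD j.toNat []) (PySem.Int.toStr v))) from rfl,
      ih, List.length_set]

theorem length_pvScatter (gs : List (List Int)) (n : Int) (r : List (List (String × String))) :
    (pvScatter gs n r).length = r.length := by
  induction gs generalizing n r with
  | nil => rfl
  | cons g gs ih =>
    simpa [pvScatter, PySem.List.enumerate_cons, List.foldl_cons, pvScatter] using
      (ih (n + 1) (pvWrite n g r)).trans (length_pvWrite n g r)

-- pointwise effect of one group's write (distinct in-range indices)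
theorem pvWrite_getElem? (v : Int) :
    ∀ (m : List Int) (r : List (List (String × String))),
    m.Nodup → (∀ j ∈ m, 0 ≤ j ∧ j.toNat < r.length) → ∀ i : Nat,
    (pvWrite v m r)[i]? =
      if (↑i : Int) ∈ m then some (pvSetCluster (r.getD i []) (PySem.Int.toStr v)) else r[i]? := by
  intro m
  induction m with
  | nil => intro r _ _ i; simp [pvWrite]
  | cons j m ih =>
    intro r hnd hb i
    obtain ⟨hj0, hjlt⟩ := hb j (List.mem_cons_self)
    have hji : j = (j.toNat : Int) := (Int.toNat_of_nonneg hj0).symm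
    have hset : pvWrite v (j :: m) r
        = pvWrite v m (r.set j.toNat (pvSetCluster (r.getD j.toNat []) (PySem.Int.toStr v))) := by
      simp [pvWrite, List.foldl_cons]
    rw [hset]
    set r1 := r.set j.toNat (pvSetCluster (r.getD j.toNat []) (PySem.Int.toStr v)) with hr1
    have hb1 : ∀ k ∈ m, 0 ≤ k ∧ k.toNat < r1.length := by
      intro k hk
      simpa [hr1, List.length_set] using hb k (List.mem_cons_of_mem _ hk)
    rw [ih r1 hnd.of_cons hb1 i]
    by_cases hij : (↑i : Int) = j
    · have hi : i = j.toNat := by omega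
      subst hi
      have hjm : j ∉ m := (List.nodup_cons.mp hnd).1
      have hcond : ((↑(j.toNat) : Int) ∈ j :: m) := by rw [← hji]; exact List.mem_cons_self
      have hnin : ((↑(j.toNat) : Int) ∉ m) := by rw [← hji]; exact hjm
      rw [if_pos hcond, if_neg hnin, hr1, List.getElem?_set_self hjlt]
    · have hne : i ≠ j.toNat := by omega
      have hget : r1[i]? = r[i]? := by rw [hr1]; exact List.getElem?_set_ne (by omega)
      have hgetD : r1.getD i [] = r.getD i [] := by
        simp [List.getD_eq_getElem?_getD, hget]
      simp only [hgetD, hget, List.mem_cons, hij, false_or]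

-- membership in pvIdxList
theorem mem_pvIdxList (rows : List (List (String × String))) (c : String) (i : Nat) :
    ((↑i : Int) ∈ pvIdxList rows c) ↔ (i < rows.length ∧ pvCluster (rows.getD i []) = c) := by
  unfold pvIdxList
  simp only [List.mem_map, List.mem_filter, PySem.List.mem_enumerate_iff]
  constructor
  · rintro ⟨p, ⟨⟨k, hk, rfl⟩, hpc⟩, hfst⟩
    have hki : k = i := by simp at hfst; omega
    subst hki
    refine ⟨hk, ?_⟩
    have : rows.getD k [] = rows[k] := List.getD_eq_getElem rows [] hk
    rw [this]; simpa using hpc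
  · rintro ⟨hi, hc⟩
    refine ⟨(↑i, rows[i]), ⟨⟨i, hi, by simp⟩, ?_⟩, rfl⟩
    have : rows.getD i [] = rows[i] := List.getD_eq_getElem rows [] hi
    rw [this] at hc; simpa using hc

theorem nodup_pvIdxList (rows : List (List (String × String))) (c : String) :
    (pvIdxList rows c).Nodup := by
  unfold pvIdxList
  have h1 : (PySem.List.enumerate rows 0).Pairwise (fun p q => p.1 < q.1) :=
    PySem.List.pairwise_lt_enumerate rows 0
  have h2 := h1.filter (fun p => pvCluster p.2 == c)
  have h3 : ((PySem.List.enumerate rows 0).filter (fun p => pvCluster p.2 == c)).Pairwise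
      (fun p q => p.1 ≠ q.1) := h2.imp (fun h => ne_of_lt h)
  exact (List.pairwise_map.mpr h3).imp (fun h => h)

theorem bounds_pvIdxList (rows : List (List (String × String))) (c : String) :
    ∀ j ∈ pvIdxList rows c, 0 ≤ j ∧ j.toNat < rows.length := by
  intro j hj
  unfold pvIdxList at hj
  simp only [List.mem_map, List.mem_filter, PySem.List.mem_enumerate_iff] at hj
  obtain ⟨p, ⟨⟨k, hk, rfl⟩, -⟩, hfst⟩ := hj
  subst hfst
  simp; omega

-- pointwise effect of the whole scatter over distinct keys
theorem pvScatter_getElem? (rows : List (List (String × String))) :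
    ∀ (cs : List String) (n : Int) (r : List (List (String × String))),
    cs.Nodup → r.length = rows.length → ∀ i : Nat, i < rows.length →
    (pvScatter (cs.map (pvIdxList rows)) n r)[i]? =
      (match PySem.List.index? cs (pvCluster (rows.getD i [])) with
       | some k => some (pvSetCluster (r.getD i []) (PySem.Int.toStr (n + (k : Int))))
       | none => r[i]?) := by
  intro cs
  induction cs with
  | nil =>
    intro n r _ _ i _
    simp [pvScatter, PySem.List.enumerate_nil, PySem.List.index?_eq_idxOf?]
  | cons c cs ih =>
    intro n r hnd hlen i hi
    have hstep : pvScatter ((c :: cs).map (pvIdxList rows)) n r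
        = pvScatter (cs.map (pvIdxList rows)) (n + 1) (pvWrite n (pvIdxList rows c) r) := by
      simp [pvScatter, PySem.List.enumerate_cons, List.foldl_cons]
    rw [hstep]
    set r1 := pvWrite n (pvIdxList rows c) r with hr1
    have hlen1 : r1.length = rows.length := by rw [hr1, length_pvWrite]; exact hlen
    have hbnds : ∀ j ∈ pvIdxList rows c, 0 ≤ j ∧ j.toNat < r.length := by
      intro j hj
      have := bounds_pvIdxList rows c j hj
      omega
    have hw := pvWrite_getElem? n (pvIdxList rows c) r (nodup_pvIdxList rows c) hbnds i
    have hmem := mem_pvIdxList rows c i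
    rw [ih (n + 1) r1 hnd.of_cons hlen1 i hi]
    by_cases hcc : pvCluster (rows.getD i []) = c
    · -- this row belongs to group c, which is not among the remaining keys
      have hnin : pvCluster (rows.getD i []) ∉ cs := by
        rw [hcc]; exact (List.nodup_cons.mp hnd).1
      have hnone : PySem.List.index? cs (pvCluster (rows.getD i [])) = none :=
        (PySem.List.index?_eq_none_iff _ _).mpr hnin
      have hsome : PySem.List.index? (c :: cs) (pvCluster (rows.getD i [])) = some 0 := by
        rw [hcc]; exact PySem.List.index?_cons_self c cs
      rw [hnone, hsome]
      simp only
      rw [hw]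
      have : (↑i : Int) ∈ pvIdxList rows c := (mem_pvIdxList rows c i).mpr ⟨hi, hcc⟩
      simp [this]
    · have hne : c ≠ pvCluster (rows.getD i []) := fun h => hcc h.symm
      have hcons := PySem.List.index?_cons_of_ne (x := c)
        (v := pvCluster (rows.getD i [])) cs hne
      have hnin : (↑i : Int) ∉ pvIdxList rows c := fun h => hcc ((mem_pvIdxList rows c i).mp h).2
      have hget1 : r1[i]? = r[i]? := by rw [hr1, hw]; simp [hnin]
      have hgetD1 : r1.getD i [] = r.getD i [] := by
        simp [List.getD_eq_getElem?_getD, hget1]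
      rw [hcons]
      cases hk : PySem.List.index? cs (pvCluster (rows.getD i [])) with
      | none => simp only [Option.map_none]; exact hget1
      | some k =>
        simp only [Option.map_some, hgetD1]
        congr 2
        push_cast
        ring

-- the grouping dict of port B, characterised
theorem groups_spec (rows : List (List (String × String))) :
    let groups := (PySem.List.enumerate rows).foldl
      (fun (g : PySem.Dict String (List Int)) p => g.modify (pvCluster p.2) [] (fun l => l ++ [p.1]))
      PySem.Dict.empty
    groups.keys = pvDs rows ∧ (∀ c, groups.getD c [] = pvIdxList rows c) := by
  intro groups
  constructor
  · have hk := PySem.Dict.keys_foldl_modify_key (l := PySem.List.enumerate rows)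
      (key := fun p => pvCluster p.2) (d0 := ([] : List Int))
      (f := fun _ p => (fun l => l ++ [p.1])) (d := PySem.Dict.empty)
    rw [hk]
    have hmap : (PySem.List.enumerate rows).map (fun p => pvCluster p.2)
        = rows.map pvCluster := by
      rw [show (fun (p : Int × List (String × String)) => pvCluster p.2)
            = pvCluster ∘ (fun p => p.2) from rfl, ← List.map_map,
          PySem.List.map_snd_enumerate]
    rw [hmap]
    simp [pvDs, PySem.Set.update_nil_left]
  · intro c
    have hfold : groups
        = ((PySem.List.enumerate rows).map (fun p => (pvCluster p.2, p.1))).foldl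
            (fun (g : PySem.Dict String (List Int)) q => g.modify q.1 [] (fun l => l ++ [q.2]))
            PySem.Dict.empty := by
      rw [List.foldl_map]
    rw [hfold, PySem.Dict.getD_foldl_modify_append]
    simp only [PySem.Dict.getD_empty, List.nil_append]
    rw [List.filter_map]
    rw [List.map_map]
    rfl

-- B's result, in the same canonical form
theorem renumber_clusters_alt_eq_canonical (rows : List (List (String × String))) (start_id : Int) :
    renumber_clusters_alt rows start_id
      = (rows.map (fun row =>
           pvSetCluster row (PySem.Int.toStr (start_id +
             ((PySem.List.index? (pvDs rows) (pvCluster row)).getD 0 : Nat)))),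
         start_id + (pvDs rows).length) := by
  obtain ⟨hkeys, hgetD⟩ := groups_spec rows
  unfold renumber_clusters_alt
  dsimp only at hkeys hgetD ⊢
  set groups := (PySem.List.enumerate rows).foldl
    (fun (g : PySem.Dict String (List Int)) p => g.modify (pvCluster p.2) [] (fun l => l ++ [p.1]))
    PySem.Dict.empty with hg
  have hndkeys : groups.keys.Nodup := by
    rw [hkeys]; exact PySem.Set.nodup_ofList _
  have hvals : groups.values = (pvDs rows).map (pvIdxList rows) := by
    rw [PySem.Dict.values_eq_map_keys groups hndkeys []]
    rw [hkeys]
    exact List.map_congr_left (fun c _ => hgetD c)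
  have hsize : groups.size = (pvDs rows).length := by
    have : groups.size = groups.keys.length := by
      simp [PySem.Dict.size, PySem.Dict.keys]
    rw [this, hkeys]
  have hnds : (pvDs rows).Nodup := PySem.Set.nodup_ofList _
  rw [Prod.mk.injEq]
  constructor
  · -- the scattered list equals the canonical map, pointwise
    show (PySem.List.enumerate groups.values start_id).foldl
        (fun (r : List (List (String × String))) q =>
          q.2.foldl (fun r i => r.set i.toNat (pvSetCluster (r.getD i.toNat []) (PySem.Int.toStr q.1))) r)
        rows = _
    have hscat : (PySem.List.enumerate groups.values start_id).foldl
        (fun (r : List (List (String × String))) q =>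
          q.2.foldl (fun r i => r.set i.toNat (pvSetCluster (r.getD i.toNat []) (PySem.Int.toStr q.1))) r)
        rows = pvScatter groups.values start_id rows := rfl
    rw [hscat, hvals]
    apply List.ext_getElem?
    intro i
    by_cases hi : i < rows.length
    · rw [pvScatter_getElem? rows (pvDs rows) start_id rows hnds rfl i hi]
      have hgd : rows.getD i [] = rows[i] := List.getD_eq_getElem rows [] hi
      have hmemds : pvCluster (rows.getD i []) ∈ pvDs rows := by
        unfold pvDs
        rw [PySem.Set.mem_ofList, hgd]
        exact List.mem_map.mpr ⟨rows[i], by simp, rfl⟩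
      cases hk : PySem.List.index? (pvDs rows) (pvCluster (rows.getD i [])) with
      | none => exact absurd hmemds ((PySem.List.index?_eq_none_iff _ _).mp hk)
      | some k =>
        simp only
        rw [hgd] at hk ⊢
        rw [List.getElem?_map, List.getElem?_eq_getElem hi]
        simp only [Option.map_some, hk, Option.getD_some]
    · have h1 : (pvScatter ((pvDs rows).map (pvIdxList rows)) start_id rows)[i]? = none := by
        rw [List.getElem?_eq_none]
        rw [length_pvScatter]; omega
      have h2 : (rows.map (fun row =>
          pvSetCluster row (PySem.Int.toStr (start_id +
            ((PySem.List.index? (pvDs rows) (pvCluster row)).getD 0 : Nat)))))[i]? = none := by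
        rw [List.getElem?_eq_none]; simp; omega
      rw [h1, h2]
  · -- the counter
    show start_id + (groups.size : Int) = start_id + ((pvDs rows).length : Int)
    rw [hsize]

-- ===== VERDICT (by name: the statement is the Claim_ definition above) =====
theorem renumber_clusters_spec : Claim_equal_renumber_clusters := by
  intro rows start_id _ _
  unfold Spec_renumber_clusters
  rw [renumber_clusters_eq_canonical, renumber_clusters_alt_eq_canonical]
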